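-- pv_equiv track=rewrite | github.com/SinGitAi/LabRes | formuls_calculation_functions.py | _find_divisors
-- ===== SOURCE A (Python) =====
-- def _find_divisors(n):
--     i = 2
--     divisors = []
--
--     while i ** 2 <= n:
--         if n % i == 0:
--             divisors.append(i)
--             if i != n // i:
--                 divisors.append(n // i)
--         i += 1
--     divisors.sort()
--
--     return divisors
-- ===== SOURCE B (Python) =====
-- def _find_divisors(n):
--     m = n
--     fac = []
--     p = 2
--     while p * p <= m:
--         if m % p == 0:
--             e = 0
--             while m % p == 0:
--                 m //= p
--                 e += 1
--             fac.append((p, e))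
--         p += 1
--     if m > 1:
--         fac.append((m, 1))
--     divs = [1]
--     for (q, e) in fac:
--         divs = [d * q ** k for d in divs for k in range(e + 1)]
--     divs.sort()
--     return [d for d in divs if d != 1 and d != n]
-- ===== Notes on version B (the rewrite author's own statement) =====
-- stated objective: alternative
-- what changed: Instead of scanning all candidates up to sqrt(n) and pairing each divisor i with its cofactor n//i, B computes the prime factorization of n (dividing each found prime out completely) and then enumerates every divisor multiplicatively as a product of prime powers, sorting and dropping 1 and n at the end.
import Mathlib
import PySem

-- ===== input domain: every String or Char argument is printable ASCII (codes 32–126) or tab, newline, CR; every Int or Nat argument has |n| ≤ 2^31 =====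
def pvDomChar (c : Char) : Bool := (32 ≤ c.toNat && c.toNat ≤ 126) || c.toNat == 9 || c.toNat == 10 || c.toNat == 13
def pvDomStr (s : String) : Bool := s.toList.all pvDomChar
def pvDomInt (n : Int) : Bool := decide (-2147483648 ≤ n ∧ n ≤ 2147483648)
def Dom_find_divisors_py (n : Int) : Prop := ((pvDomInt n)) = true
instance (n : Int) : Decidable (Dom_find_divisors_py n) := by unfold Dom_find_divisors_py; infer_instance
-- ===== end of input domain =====

-- B replaces A's sqrt-bounded divisor-pairing scan by prime factorization followed by
-- multiplicative enumeration of all divisors; objective: alternative algorithm.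

-- ===== PORT A =====
-- termination measure lemma for A's loop (cited by name in decreasing_by)
theorem pvALoop_dec (n i : Int) (h : i * i ≤ n) :
    (n + 1 - (i + 1)).toNat < (n + 1 - i).toNat := by
  have hin : i ≤ n := by
    by_cases h0 : i ≤ 0
    · nlinarith
    · nlinarith
  omega

-- the while loop of A: i from 2 while i*i ≤ n (`i ** 2` ported as `i * i`), appending i and n // i
def pvALoop (n i : Int) (divisors : List Int) : List Int :=
  if _h : i * i ≤ n then
    pvALoop n (i + 1)
      (if PySem.Int.mod n i = 0 then
        (if i ≠ PySem.Int.floordiv n i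
          then (divisors ++ [i]) ++ [PySem.Int.floordiv n i]
          else divisors ++ [i])
       else divisors)
  else divisors
termination_by (n + 1 - i).toNat
decreasing_by exact pvALoop_dec n i _h

def find_divisors_py (n : Int) : List Int :=
  PySem.List.sorted (pvALoop n 2 []) (fun x => x) false

-- ===== PORT B =====
-- the inner while of Source B: divide p out of m, counting (the 0 < m ∧ 2 ≤ p conjuncts only
-- make the recursion total; whenever Python reaches this loop they hold)
-- termination measure lemma for the inner loop (cited by name in decreasing_by)
theorem pvDivOut_dec (m p : Int) (h : PySem.Int.mod m p = 0 ∧ 0 < m ∧ 2 ≤ p) :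
    (PySem.Int.floordiv m p).toNat < m.toNat := by
  obtain ⟨h1, h2, h3⟩ := h
  have hd : PySem.Int.floordiv m p = m / p := PySem.Int.floordiv_eq_ediv_of_pos (by omega)
  have hlt : m / p < m := by
    apply Int.ediv_lt_of_lt_mul (by omega)
    nlinarith
  have hge : 0 ≤ m / p := Int.ediv_nonneg (by omega) (by omega)
  rw [hd]; omega

def pvDivOut (m p e : Int) : Int × Int :=
  if h : PySem.Int.mod m p = 0 ∧ 0 < m ∧ 2 ≤ p then
    pvDivOut (PySem.Int.floordiv m p) p (e + 1)
  else (m, e)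
termination_by m.toNat
decreasing_by exact pvDivOut_dec m p h

-- a bound used only for termination of the outer loop
theorem pvDivOut_fst_le (m p e : Int) : (pvDivOut m p e).1 ≤ m := by
  induction m, e using pvDivOut.induct p with
  | case1 m e h ih =>
    obtain ⟨h1, h2, h3⟩ := h
    have hd : PySem.Int.floordiv m p = m / p := PySem.Int.floordiv_eq_ediv_of_pos (by omega)
    have hlt : m / p < m := by
      apply Int.ediv_lt_of_lt_mul (by omega)
      nlinarith
    rw [pvDivOut, dif_pos ⟨h1, h2, h3⟩]
    rw [hd] at ih ⊢
    omega
  | case2 m e h =>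
    rw [pvDivOut, dif_neg h]

-- termination measure lemmas for the outer loop (cited by name in decreasing_by)
theorem pvFacLoop_dec2 (m p : Int) (h : p * p ≤ m) :
    (m + 1 - (p + 1)).toNat < (m + 1 - p).toNat := by
  have hpm : p ≤ m := by
    by_cases h0 : p ≤ 0
    · nlinarith
    · nlinarith
  omega

theorem pvFacLoop_dec1 (m p : Int) (h : p * p ≤ m) :
    ((pvDivOut m p 0).1 + 1 - (p + 1)).toNat < (m + 1 - p).toNat := by
  have hpm : p ≤ m := by
    by_cases h0 : p ≤ 0
    · nlinarith
    · nlinarith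
  have := pvDivOut_fst_le m p 0
  omega

-- the outer while of Source B: trial division recording (prime, exponent) pairs
def pvFacLoop (m p : Int) (fac : List (Int × Int)) : Int × List (Int × Int) :=
  if _h : p * p ≤ m then
    if PySem.Int.mod m p = 0 then
      pvFacLoop (pvDivOut m p 0).1 (p + 1) (fac ++ [(p, (pvDivOut m p 0).2)])
    else
      pvFacLoop m (p + 1) fac
  else (m, fac)
termination_by (m + 1 - p).toNat
decreasing_by
  · exact pvFacLoop_dec1 m p _h
  · exact pvFacLoop_dec2 m p _h

-- the for-loop of Source B: divs = [d * q ** k for d in divs for k in range(e + 1)]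
-- (q ** k ported as q ^ k.toNat; exact here since range(e+1) yields k ≥ 0)
def pvExpand (fac : List (Int × Int)) (divs : List Int) : List Int :=
  match fac with
  | [] => divs
  | (q, e) :: rest =>
      pvExpand rest
        (divs.flatMap (fun d => (PySem.List.pyRange 0 (e + 1) 1).map (fun k => d * q ^ k.toNat)))

def find_divisors_py_alt (n : Int) : List Int :=
  let r := pvFacLoop n 2 []
  let fac := if 1 < r.1 then r.2 ++ [(r.1, 1)] else r.2
  let divs := PySem.List.sorted (pvExpand fac [1]) (fun x => x) false
  divs.filter (fun d => decide (d ≠ 1 ∧ d ≠ n))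

-- ===== PRECONDITION & SPEC =====
def Spec_find_divisors_py (n : Int) (out : List Int) : Prop := out = find_divisors_py_alt n
instance (n : Int) (out : List Int) : Decidable (Spec_find_divisors_py n out) := by unfold Spec_find_divisors_py; infer_instance

-- ===== CLAIM (what is proved, stated in full; the proofs are below) =====
def Claim_equal_find_divisors_py : Prop := ∀ (n : Int), Dom_find_divisors_py n → Spec_find_divisors_py n (find_divisors_py n)

-- ===== LEMMAS AND PROOFS =====

-- A's pair characterisation of the non-trivial divisors coincides with the plain one
theorem pair_char (n x : Int) :
    (∃ j, 2 ≤ j ∧ j * j ≤ n ∧ j ∣ n ∧ (x = j ∨ x = n / j)) ↔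
      (2 ≤ x ∧ x < n ∧ x ∣ n) := by
  constructor
  · rintro ⟨j, hj2, hjj, hjd, hc | hc⟩
    · subst hc
      exact ⟨hj2, by nlinarith, hjd⟩
    · subst hc
      have hm : n / j * j = n := Int.ediv_mul_cancel hjd
      have hq2 : 2 ≤ n / j := by nlinarith
      refine ⟨hq2, by nlinarith, ⟨j, by linarith⟩⟩
  · rintro ⟨hx2, hxn, hxd⟩
    have hm : n / x * x = n := Int.ediv_mul_cancel hxd
    have hq1 : 1 ≤ n / x := by nlinarith
    have hq2 : 2 ≤ n / x := by
      rcases eq_or_lt_of_le hq1 with h | h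
      · exfalso; rw [← h, one_mul] at hm; omega
      · omega
    by_cases hxx : x * x ≤ n
    · exact ⟨x, hx2, hxx, hxd, Or.inl rfl⟩
    · refine ⟨n / x, hq2, by nlinarith, ⟨x, by linarith⟩, Or.inr ?_⟩
      have : n / (n / x) = x :=
        Int.ediv_eq_of_eq_mul_left (by omega) (by linarith)
      rw [this]

-- the combined nodup + membership invariant of A's loop
theorem pvALoop_invariant (n i : Int) (acc : List Int) :
    2 ≤ i →
    acc.Nodup →
    (∀ x ∈ acc, ∃ j, 2 ≤ j ∧ j < i ∧ j * j ≤ n ∧ j ∣ n ∧ (x = j ∨ x = n / j)) →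
    (pvALoop n i acc).Nodup ∧
      ∀ x, (x ∈ pvALoop n i acc ↔
        x ∈ acc ∨ ∃ j, i ≤ j ∧ j * j ≤ n ∧ j ∣ n ∧ (x = j ∨ x = n / j)) := by
  induction i, acc using pvALoop.induct n with
  | case1 i acc hcond ih =>
    intro hi hnd hinv
    have hi0 : 0 < i := by omega
    have hn0 : 0 < n := by nlinarith
    have hd : PySem.Int.floordiv n i = n / i := PySem.Int.floordiv_eq_ediv_of_pos hi0
    rw [pvALoop, dif_pos hcond]
    by_cases hdvd : i ∣ n
    · -- i divides n: i (and possibly n / i) are appended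
      have hm0 : PySem.Int.mod n i = 0 := (PySem.Int.mod_eq_zero_iff_dvd n i).mpr hdvd
      have hmul : n / i * i = n := Int.ediv_mul_cancel hdvd
      have hiacc : i ∉ acc := by
        intro hmem
        obtain ⟨j, hj2, hji, hjj, hjd, hc | hc⟩ := hinv i hmem
        · omega
        · have hjm : n / j * j = n := Int.ediv_mul_cancel hjd
          nlinarith
      have hdacc : n / i ∉ acc := by
        intro hmem
        obtain ⟨j, hj2, hji, hjj, hjd, hc | hc⟩ := hinv (n / i) hmem
        · nlinarith
        · have hjm : n / j * j = n := Int.ediv_mul_cancel hjd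
          have hq : 0 < n / i := by nlinarith
          nlinarith
      by_cases hne : i = n / i
      · -- only i appended
        have h2 : ¬ (i ≠ PySem.Int.floordiv n i) := by rw [hd]; exact not_not_intro hne
        have e1 : (if _h : PySem.Int.mod n i = 0 then
            (if _h : i ≠ PySem.Int.floordiv n i then (acc ++ [i]) ++ [PySem.Int.floordiv n i] else acc ++ [i])
            else acc) = acc ++ [i] := by rw [dif_pos hm0, dif_neg h2]
        rw [e1] at ih
        rw [if_pos hm0, if_neg h2]
        have hnd' : (acc ++ [i]).Nodup := by
          rw [List.nodup_append]
          exact ⟨hnd, List.nodup_singleton i, by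
            intro a ha b hb heq
            rw [List.mem_singleton] at hb
            rw [heq, hb] at ha
            exact hiacc ha⟩
        have hinv' : ∀ x ∈ acc ++ [i], ∃ j, 2 ≤ j ∧ j < i + 1 ∧ j * j ≤ n ∧ j ∣ n ∧ (x = j ∨ x = n / j) := by
          intro x hx
          rcases List.mem_append.1 hx with hx | hx
          · obtain ⟨j, h1, h2, h3, h4, h5⟩ := hinv x hx
            exact ⟨j, h1, by omega, h3, h4, h5⟩
          · simp at hx
            exact ⟨i, hi, by omega, hcond, hdvd, Or.inl hx⟩
        obtain ⟨hnd2, hmem2⟩ := ih (by omega) hnd' hinv'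
        refine ⟨hnd2, fun x => ?_⟩
        rw [hmem2 x]
        constructor
        · rintro (hx | ⟨j, h1, h2, h3, h4⟩)
          · rcases List.mem_append.1 hx with hx | hx
            · exact Or.inl hx
            · simp at hx
              exact Or.inr ⟨i, le_refl i, hcond, hdvd, Or.inl hx⟩
          · exact Or.inr ⟨j, by omega, h2, h3, h4⟩
        · rintro (hx | ⟨j, h1, h2, h3, h4⟩)
          · exact Or.inl (List.mem_append.2 (Or.inl hx))
          · rcases eq_or_lt_of_le h1 with hji | hji
            · refine Or.inl (List.mem_append.2 (Or.inr ?_))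
              subst hji
              rcases h4 with h4 | h4
              · simp [h4]
              · rw [List.mem_singleton, h4, ← hne]
            · exact Or.inr ⟨j, by omega, h2, h3, h4⟩
      · -- i and n / i both appended
        have h2 : i ≠ PySem.Int.floordiv n i := by rw [hd]; exact hne
        have e1 : (if _h : PySem.Int.mod n i = 0 then
            (if _h : i ≠ PySem.Int.floordiv n i then (acc ++ [i]) ++ [PySem.Int.floordiv n i] else acc ++ [i])
            else acc) = (acc ++ [i]) ++ [n / i] := by rw [dif_pos hm0, dif_pos h2, hd]
        rw [e1] at ih
        rw [if_pos hm0, if_pos h2, hd]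
        have hnd' : ((acc ++ [i]) ++ [n / i]).Nodup := by
          rw [List.nodup_append]
          refine ⟨?_, List.nodup_singleton _, ?_⟩
          · rw [List.nodup_append]
            exact ⟨hnd, List.nodup_singleton i, by
            intro a ha b hb heq
            rw [List.mem_singleton] at hb
            rw [heq, hb] at ha
            exact hiacc ha⟩
          · intro a ha b hb heq
            rw [List.mem_singleton] at hb
            rw [heq, hb] at ha
            rcases List.mem_append.1 ha with h' | h'
            · exact hdacc h'
            · rw [List.mem_singleton] at h'
              exact hne h'.symm
        have hinv' : ∀ x ∈ (acc ++ [i]) ++ [n / i], ∃ j, 2 ≤ j ∧ j < i + 1 ∧ j * j ≤ n ∧ j ∣ n ∧ (x = j ∨ x = n / j) := by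
          intro x hx
          rcases List.mem_append.1 hx with hx | hx
          · rcases List.mem_append.1 hx with hx | hx
            · obtain ⟨j, h1, h2, h3, h4, h5⟩ := hinv x hx
              exact ⟨j, h1, by omega, h3, h4, h5⟩
            · simp at hx
              exact ⟨i, hi, by omega, hcond, hdvd, Or.inl hx⟩
          · simp at hx
            exact ⟨i, hi, by omega, hcond, hdvd, Or.inr hx⟩
        obtain ⟨hnd2, hmem2⟩ := ih (by omega) hnd' hinv'
        refine ⟨hnd2, fun x => ?_⟩
        rw [hmem2 x]
        constructor
        · rintro (hx | ⟨j, h1, h2, h3, h4⟩)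
          · rcases List.mem_append.1 hx with hx | hx
            · rcases List.mem_append.1 hx with hx | hx
              · exact Or.inl hx
              · simp at hx
                exact Or.inr ⟨i, le_refl i, hcond, hdvd, Or.inl hx⟩
            · simp at hx
              exact Or.inr ⟨i, le_refl i, hcond, hdvd, Or.inr hx⟩
          · exact Or.inr ⟨j, by omega, h2, h3, h4⟩
        · rintro (hx | ⟨j, h1, h2, h3, h4⟩)
          · exact Or.inl (List.mem_append.2 (Or.inl (List.mem_append.2 (Or.inl hx))))
          · rcases eq_or_lt_of_le h1 with hji | hji
            · subst hji
              rcases h4 with h4 | h4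
              · exact Or.inl (List.mem_append.2 (Or.inl (List.mem_append.2 (Or.inr (by simp [h4])))))
              · exact Or.inl (List.mem_append.2 (Or.inr (by simp [h4])))
            · exact Or.inr ⟨j, by omega, h2, h3, h4⟩
    · -- i does not divide n: acc unchanged
      have hm0 : ¬ PySem.Int.mod n i = 0 := by
        rw [PySem.Int.mod_eq_zero_iff_dvd]; exact hdvd
      have e1 : (if _h : PySem.Int.mod n i = 0 then
          (if _h : i ≠ PySem.Int.floordiv n i then (acc ++ [i]) ++ [PySem.Int.floordiv n i] else acc ++ [i])
          else acc) = acc := by rw [dif_neg hm0]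
      rw [e1] at ih
      rw [if_neg hm0]
      have hinv' : ∀ x ∈ acc, ∃ j, 2 ≤ j ∧ j < i + 1 ∧ j * j ≤ n ∧ j ∣ n ∧ (x = j ∨ x = n / j) := by
        intro x hx
        obtain ⟨j, h1, h2, h3, h4, h5⟩ := hinv x hx
        exact ⟨j, h1, by omega, h3, h4, h5⟩
      obtain ⟨hnd2, hmem2⟩ := ih (by omega) hnd hinv'
      refine ⟨hnd2, fun x => ?_⟩
      rw [hmem2 x]
      constructor
      · rintro (hx | ⟨j, h1, h2, h3, h4⟩)
        · exact Or.inl hx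
        · exact Or.inr ⟨j, by omega, h2, h3, h4⟩
      · rintro (hx | ⟨j, h1, h2, h3, h4⟩)
        · exact Or.inl hx
        · rcases eq_or_lt_of_le h1 with hji | hji
          · exact absurd (hji ▸ h3) hdvd
          · exact Or.inr ⟨j, by omega, h2, h3, h4⟩
  | case2 i acc hcond =>
    intro hi hnd hinv
    rw [pvALoop, dif_neg hcond]
    refine ⟨hnd, fun x => ?_⟩
    constructor
    · exact Or.inl
    · rintro (hx | ⟨j, h1, h2, h3, h4⟩)
      · exact hx
      · exact absurd h2 (by nlinarith)

-- what the inner division loop computes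
theorem pvDivOut_spec (m p e : Int) :
    2 ≤ p → 0 < m →
    ∃ k : ℕ, (pvDivOut m p e).2 = e + k ∧ m = (pvDivOut m p e).1 * p ^ k ∧
      ¬ p ∣ (pvDivOut m p e).1 ∧ 0 < (pvDivOut m p e).1 := by
  induction m, e using pvDivOut.induct p with
  | case1 m e h ih =>
    intro hp hm
    obtain ⟨h1, h2, h3⟩ := h
    have hdvd : p ∣ m := (PySem.Int.mod_eq_zero_iff_dvd m p).mp h1
    have hd : PySem.Int.floordiv m p = m / p := PySem.Int.floordiv_eq_ediv_of_pos (by omega)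
    have hm1 : 0 < m / p := by
      have hpm : p ≤ m := Int.le_of_dvd h2 hdvd
      have := (Int.le_div_iff_of_dvd_of_pos (by omega) hdvd).mpr (by linarith : p * 1 ≤ m)
      omega
    have hcancel : m / p * p = m := Int.ediv_mul_cancel hdvd
    rw [pvDivOut, dif_pos ⟨h1, h2, h3⟩]
    rw [hd] at ih ⊢
    obtain ⟨k, hk1, hk2, hk3, hk4⟩ := ih hp hm1
    refine ⟨k + 1, ?_, ?_, hk3, hk4⟩
    · rw [hk1]; push_cast; ring
    · calc m = m / p * p := hcancel.symm
        _ = ((pvDivOut (m / p) p (e + 1)).1 * p ^ k) * p := by rw [← hk2]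
        _ = (pvDivOut (m / p) p (e + 1)).1 * p ^ (k + 1) := by ring
  | case2 m e h =>
    intro hp hm
    have hnd : ¬ p ∣ m := by
      intro hdvd
      exact h ⟨(PySem.Int.mod_eq_zero_iff_dvd m p).mpr hdvd, hm, hp⟩
    rw [pvDivOut, dif_neg h]
    exact ⟨0, by simp, by simp, hnd, hm⟩

-- the product of the recorded prime powers
def pvProdFE (l : List (Int × Int)) : Int := (l.map (fun pe => pe.1 ^ pe.2.toNat)).prod

-- the factorisation invariant of the outer loop
theorem pvFacLoop_spec (m p : Int) (fac : List (Int × Int)) :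
    2 ≤ p → 0 < m → (∀ q : Int, 2 ≤ q → q < p → ¬ q ∣ m) →
    ∃ p' ext,
      p ≤ p' ∧
      (pvFacLoop m p fac).2 = fac ++ ext ∧
      m = (pvFacLoop m p fac).1 * pvProdFE ext ∧
      0 < (pvFacLoop m p fac).1 ∧
      (pvFacLoop m p fac).1 < p' * p' ∧
      (∀ q : Int, 2 ≤ q → q < p' → ¬ q ∣ (pvFacLoop m p fac).1) ∧
      (∀ pe ∈ ext, 2 ≤ pe.1 ∧ p ≤ pe.1 ∧ pe.1 < p' ∧ 1 ≤ pe.2 ∧ pe.1.natAbs.Prime ∧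
        ¬ pe.1 ∣ (pvFacLoop m p fac).1) ∧
      List.Pairwise (fun a b : Int × Int => a.1 < b.1) ext := by
  induction m, p, fac using pvFacLoop.induct with
  | case1 m p fac hg hm0 ih =>
    intro hp hm hnf
    have hdvd : p ∣ m := (PySem.Int.mod_eq_zero_iff_dvd m p).mp hm0
    obtain ⟨k, he, hprod, hnp, hpos⟩ := pvDivOut_spec m p 0 hp hm
    have hk1 : 1 ≤ k := by
      rcases Nat.eq_zero_or_pos k with h0 | h
      · exfalso
        rw [h0, pow_zero, mul_one] at hprod
        rw [← hprod] at hnp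
        exact hnp hdvd
      · exact h
    have hm1dvd : (pvDivOut m p 0).1 ∣ m := ⟨p ^ k, hprod⟩
    have hnf1 : ∀ q : Int, 2 ≤ q → q < p + 1 → ¬ q ∣ (pvDivOut m p 0).1 := by
      intro q hq2 hqp hqd
      by_cases hq : q < p
      · exact hnf q hq2 hq (hqd.trans hm1dvd)
      · have hqe : q = p := by omega
        rw [hqe] at hqd
        exact hnp hqd
    obtain ⟨p', ext', hpp', hfac', hprod', hpos', hlt', hnf', hext', hpw'⟩ :=
      ih (by omega) hpos hnf1
    have hprime : p.natAbs.Prime := by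
      rw [Nat.prime_def_lt]
      refine ⟨by omega, ?_⟩
      intro r hr hrd
      by_contra hr1
      have hr0 : r ≠ 0 := by
        rintro rfl
        rw [Nat.zero_dvd] at hrd
        omega
      have hr2 : 2 ≤ r := by omega
      have hrp : (r : Int) ∣ p := by
        have h1 : (r : Int) ∣ (p.natAbs : Int) := Int.natCast_dvd_natCast.mpr hrd
        rwa [Int.natCast_natAbs, abs_of_nonneg (by omega : (0:Int) ≤ p)] at h1
      exact hnf r (by exact_mod_cast hr2) (by omega) (hrp.trans hdvd)
    have he1 : (pvDivOut m p 0).2 = (k : Int) := by rw [he]; ring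
    rw [pvFacLoop, dif_pos hg, if_pos hm0]
    refine ⟨p', (p, (pvDivOut m p 0).2) :: ext', by omega, ?_, ?_, hpos', hlt', hnf', ?_, ?_⟩
    · rw [hfac']
      simp
    · have hpr : pvProdFE ((p, (pvDivOut m p 0).2) :: ext')
          = p ^ ((pvDivOut m p 0).2).toNat * pvProdFE ext' := by
        simp [pvProdFE]
      have hkk : ((pvDivOut m p 0).2).toNat = k := by rw [he1]; simp
      rw [hpr, hkk]
      calc m = (pvDivOut m p 0).1 * p ^ k := hprod
        _ = ((pvFacLoop (pvDivOut m p 0).1 (p + 1) (fac ++ [(p, (pvDivOut m p 0).2)])).1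
              * pvProdFE ext') * p ^ k := by rw [← hprod']
        _ = _ := by ring
    · intro pe hpe
      rcases List.mem_cons.1 hpe with hh | hh
      · rw [hh]
        refine ⟨hp, le_refl p, by omega, ?_, hprime, ?_⟩
        · rw [he1]; exact_mod_cast hk1
        · intro hc
          have : (pvFacLoop (pvDivOut m p 0).1 (p + 1) (fac ++ [(p, (pvDivOut m p 0).2)])).1
              ∣ (pvDivOut m p 0).1 := ⟨pvProdFE ext', hprod'⟩
          exact hnp (hc.trans this)
      · obtain ⟨a1, a2, a3, a4, a5, a6⟩ := hext' pe hh
        exact ⟨a1, by omega, a3, a4, a5, a6⟩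
    · rw [List.pairwise_cons]
      refine ⟨?_, hpw'⟩
      intro b hb
      have := (hext' b hb).2.1
      omega
  | case2 m p fac hg hm0 ih =>
    intro hp hm hnf
    have hnd : ¬ p ∣ m := fun hc => hm0 ((PySem.Int.mod_eq_zero_iff_dvd m p).mpr hc)
    have hnf1 : ∀ q : Int, 2 ≤ q → q < p + 1 → ¬ q ∣ m := by
      intro q hq2 hqp
      by_cases hq : q < p
      · exact hnf q hq2 hq
      · have hqe : q = p := by omega
        rw [hqe]
        exact hnd
    obtain ⟨p', ext, hpp', hfac', hprod', hpos', hlt', hnf', hext', hpw'⟩ :=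
      ih (by omega) hm hnf1
    rw [pvFacLoop, dif_pos hg, if_neg hm0]
    refine ⟨p', ext, by omega, hfac', hprod', hpos', hlt', hnf', ?_, hpw'⟩
    intro pe hpe
    obtain ⟨a1, a2, a3, a4, a5, a6⟩ := hext' pe hpe
    exact ⟨a1, by omega, a3, a4, a5, a6⟩
  | case3 m p fac hg =>
    intro hp hm hnf
    rw [pvFacLoop, dif_neg hg]
    refine ⟨p, [], le_refl p, by simp, ?_, hm, by nlinarith, hnf, by simp, List.Pairwise.nil⟩
    simp [pvProdFE]

-- the divisor-enumeration invariant of the for-loop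
theorem pvExpand_spec (fac : List (Int × Int)) (divs : List Int) (N : Int) :
    0 < N →
    (∀ pe ∈ fac, 2 ≤ pe.1 ∧ 1 ≤ pe.2 ∧ pe.1.natAbs.Prime ∧ ¬ pe.1 ∣ N) →
    List.Pairwise (fun a b : Int × Int => a.1 < b.1) fac →
    divs.Nodup →
    (∀ x, x ∈ divs ↔ 0 < x ∧ x ∣ N) →
    (pvExpand fac divs).Nodup ∧
      ∀ x, x ∈ pvExpand fac divs ↔ 0 < x ∧ x ∣ N * pvProdFE fac := by
  induction fac generalizing divs N with
  | nil =>
    intro hN hfe hpw hnd hmem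
    refine ⟨hnd, fun x => ?_⟩
    rw [show pvExpand [] divs = divs from rfl, hmem x]
    simp [pvProdFE]
  | cons pe rest ih =>
    obtain ⟨q, e⟩ := pe
    intro hN hfe hpw hnd hmem
    obtain ⟨hq2, he1, hqpr, hqN⟩ := hfe (q, e) List.mem_cons_self
    have hqInt : Prime (q : Int) := Int.prime_iff_natAbs_prime.mpr hqpr
    have hqpos : (0:Int) < q := by omega
    -- the list built by this iteration of the for-loop
    have hmemD : ∀ x, x ∈ divs.flatMap
        (fun d => (PySem.List.pyRange 0 (e + 1) 1).map (fun k => d * q ^ k.toNat)) ↔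
        0 < x ∧ x ∣ N * q ^ e.toNat := by
      intro x
      rw [List.mem_flatMap]
      constructor
      · rintro ⟨d, hd, hx⟩
        rw [List.mem_map] at hx
        obtain ⟨kI, hk, rfl⟩ := hx
        rw [PySem.List.mem_pyRange_one] at hk
        obtain ⟨hdp, hdN⟩ := (hmem d).mp hd
        refine ⟨by positivity, ?_⟩
        exact mul_dvd_mul hdN (pow_dvd_pow q (by omega))
      · rintro ⟨hx, hdvd⟩
        have hxa : (x.natAbs : Int) = x := by omega
        have hNa : (N.natAbs : Int) = N := by omega
        have hqa : (q.natAbs : Int) = q := by omega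
        have hdn : x.natAbs ∣ N.natAbs * q.natAbs ^ e.toNat := by
          have h1 : x.natAbs ∣ (N * q ^ e.toNat).natAbs := Int.natAbs_dvd_natAbs.mpr hdvd
          rwa [Int.natAbs_mul, Int.natAbs_pow] at h1
        obtain ⟨a, b, haN, hbq, hab⟩ := dvd_mul.mp hdn
        obtain ⟨i, hie, hbi⟩ := (Nat.dvd_prime_pow hqpr).mp hbq
        have hapos : 0 < a := by
          rcases Nat.eq_zero_or_pos a with h0 | h
          · exfalso; rw [h0, zero_mul] at hab; omega
          · exact h
        have haInt : (a : Int) ∣ N := by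
          have := Int.natCast_dvd_natCast.mpr haN
          rwa [hNa] at this
        refine ⟨(a : Int), (hmem _).mpr ⟨by exact_mod_cast hapos, haInt⟩, ?_⟩
        rw [List.mem_map]
        refine ⟨(i : Int), ?_, ?_⟩
        · rw [PySem.List.mem_pyRange_one]
          constructor
          · omega
          · have : (i : Int) ≤ e.toNat := by exact_mod_cast hie
            omega
        · have hiT : ((i : Int)).toNat = i := by omega
          simp only at hbi
          rw [hiT, ← hxa, hab, hbi]
          push_cast
          rw [abs_of_nonneg (by omega : (0:Int) ≤ q)]
    -- no two pairs (d, k) produce the same value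
    have key : ∀ d1 ∈ divs, ∀ d2 ∈ divs, ∀ k1 k2 : ℕ,
        d1 * q ^ k1 = d2 * q ^ k2 → k1 ≤ k2 → d1 = d2 := by
      intro d1 h1 d2 h2 k1 k2 heq hle
      obtain ⟨hd1p, hd1N⟩ := (hmem d1).mp h1
      obtain ⟨δ, hδ⟩ : ∃ δ, k2 = k1 + δ := ⟨k2 - k1, by omega⟩
      have hq0 : (q : Int) ^ k1 ≠ 0 := pow_ne_zero _ (by omega)
      have hdd : d1 = d2 * q ^ δ := by
        apply mul_right_cancel₀ hq0
        rw [heq, hδ, pow_add]; ring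
      rcases Nat.eq_zero_or_pos δ with h0 | hδp
      · rw [h0, pow_zero, mul_one] at hdd; exact hdd
      · exfalso
        have hqd1 : q ∣ d1 := by
          rw [hdd]
          exact Dvd.dvd.mul_left (dvd_pow_self q (by omega)) d2
        exact hqN (hqd1.trans hd1N)
    have hndD : (divs.flatMap
        (fun d => (PySem.List.pyRange 0 (e + 1) 1).map (fun k => d * q ^ k.toNat))).Nodup := by
      rw [List.nodup_flatMap]
      constructor
      · intro d hd
        obtain ⟨hdp, _⟩ := (hmem d).mp hd
        apply List.Nodup.map_on ?_ (PySem.List.nodup_pyRange_one 0 (e + 1))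
        intro k1 hk1 k2 hk2 heq
        rw [PySem.List.mem_pyRange_one] at hk1 hk2
        have hinj : k1.toNat = k2.toNat := by
          by_contra hne
          have hqk : (q:Int) ^ k1.toNat ≠ q ^ k2.toNat := by
            rcases Nat.lt_or_ge k1.toNat k2.toNat with h | h
            · exact ne_of_lt (pow_lt_pow_right₀ (by omega) h)
            · have h2 : k2.toNat < k1.toNat := by omega
              exact (ne_of_lt (pow_lt_pow_right₀ (by omega) h2)).symm
          exact hqk (mul_left_cancel₀ (by omega) heq)
        omega
      · have hpwne : divs.Pairwise (fun a b => a ≠ b) := hnd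
        refine hpwne.imp_of_mem ?_
        intro d1 d2 h1 h2 hne
        rw [Function.onFun, List.disjoint_left]
        intro x hx1 hx2
        rw [List.mem_map] at hx1 hx2
        obtain ⟨k1, hk1m, hkx1⟩ := hx1
        obtain ⟨k2, hk2m, hkx2⟩ := hx2
        have heq : d1 * q ^ k1.toNat = d2 * q ^ k2.toNat := by rw [hkx1, hkx2]
        rcases Nat.le_or_le k1.toNat k2.toNat with h | h
        · exact hne (key d1 h1 d2 h2 _ _ heq h)
        · exact hne (key d2 h2 d1 h1 _ _ heq.symm h).symm
    -- hypotheses for the remaining factors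
    have hpwc := List.pairwise_cons.mp hpw
    have hNq : 0 < N * q ^ e.toNat := by positivity
    have hfe' : ∀ pe ∈ rest, 2 ≤ pe.1 ∧ 1 ≤ pe.2 ∧ pe.1.natAbs.Prime ∧
        ¬ pe.1 ∣ N * q ^ e.toNat := by
      intro pe hpe
      obtain ⟨hr2, hre, hrpr, hrN⟩ := hfe pe (List.mem_cons_of_mem _ hpe)
      refine ⟨hr2, hre, hrpr, ?_⟩
      intro hc
      have hrInt : Prime (pe.1 : Int) := Int.prime_iff_natAbs_prime.mpr hrpr
      rcases (Prime.dvd_mul hrInt).mp hc with hc1 | hc1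
      · exact hrN hc1
      · have hrq : pe.1 ∣ q := hrInt.dvd_of_dvd_pow hc1
        have : pe.1.natAbs = q.natAbs :=
          (Nat.prime_dvd_prime_iff_eq hrpr hqpr).mp (Int.natAbs_dvd_natAbs.mpr hrq)
        have hqlt := hpwc.1 pe hpe
        omega
    have hres := ih _ (N * q ^ e.toNat) hNq hfe' hpwc.2 hndD hmemD
    have hprodc : N * pvProdFE ((q, e) :: rest) = (N * q ^ e.toNat) * pvProdFE rest := by
      simp [pvProdFE]; ring
    refine ⟨hres.1, fun x => ?_⟩
    rw [show pvExpand ((q, e) :: rest) divs = pvExpand rest (divs.flatMap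
        (fun d => (PySem.List.pyRange 0 (e + 1) 1).map (fun k => d * q ^ k.toNat))) from rfl]
    rw [hres.2 x, hprodc]

-- membership in [1] characterised by divisibility of 1
theorem mem_one_char (x : Int) : x ∈ [(1:Int)] ↔ 0 < x ∧ x ∣ 1 := by
  simp only [List.mem_singleton]
  constructor
  · rintro rfl
    exact ⟨one_pos, dvd_refl 1⟩
  · rintro ⟨hx, hd⟩
    have := Int.le_of_dvd one_pos hd
    omega

-- a strictly increasing list with the right members equals A's sorted result and B's
theorem pv_assemble (n : Int) (hn : 0 < n)
    (E : List Int) (hEnd : E.Nodup) (hEmem : ∀ x, x ∈ E ↔ 0 < x ∧ x ∣ n) :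
    (PySem.List.sorted (pvALoop n 2 []) (fun x => x) false) =
      (PySem.List.sorted E (fun x => x) false).filter (fun d => decide (d ≠ 1 ∧ d ≠ n)) := by
  classical
  set ys := E.toFinset.sort with hys
  have hysnd : ys.Nodup := E.toFinset.sort_nodup _
  have hyspw : ys.Pairwise (fun a b : Int => a < b) :=
    (Finset.sortedLT_sort E.toFinset).pairwise
  have hysperm : ys.Perm E := by
    apply List.perm_of_nodup_nodup_toFinset_eq hysnd hEnd
    rw [hys, Finset.sort_toFinset]
  have hBsort : PySem.List.sorted E (fun x => x) false = ys :=
    PySem.List.sorted_eq_of_perm_of_pairwise_lt _ _ _ hysperm hyspw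
  set zs := ys.filter (fun d => decide (d ≠ 1 ∧ d ≠ n)) with hzs
  have hzspw : zs.Pairwise (fun a b : Int => a < b) := hyspw.filter _
  have hinv := pvALoop_invariant n 2 [] (le_refl 2) List.nodup_nil (by simp)
  have hperm : zs.Perm (pvALoop n 2 []) := by
    apply List.perm_of_nodup_nodup_toFinset_eq (hysnd.filter _) hinv.1
    ext x
    rw [List.mem_toFinset, List.mem_toFinset, List.mem_filter, hinv.2 x, pair_char,
      hysperm.mem_iff, hEmem x]
    simp only [decide_eq_true_eq]
    constructor
    · rintro ⟨⟨hx, hd⟩, h1, h2⟩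
      have := Int.le_of_dvd hn hd
      exact Or.inr ⟨by omega, by omega, hd⟩
    · rintro (h | ⟨h2, hlt, hd⟩)
      · simp at h
      · exact ⟨⟨by omega, hd⟩, by omega, by omega⟩
  rw [hBsort,
    PySem.List.sorted_eq_of_perm_of_pairwise_lt _ _ _ hperm hzspw]

-- ===== VERDICT (by name: the statement is the Claim_ definition above) =====
theorem find_divisors_py_spec : Claim_equal_find_divisors_py := by
  intro n _
  unfold Spec_find_divisors_py find_divisors_py
  have hBdef : find_divisors_py_alt n =
      (PySem.List.sorted
        (pvExpand
          (if 1 < (pvFacLoop n 2 []).1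
            then (pvFacLoop n 2 []).2 ++ [((pvFacLoop n 2 []).1, 1)]
            else (pvFacLoop n 2 []).2)
          [1]) (fun x => x) false).filter (fun d => decide (d ≠ 1 ∧ d ≠ n)) := rfl
  by_cases hn : 0 < n
  · -- run the factor loop
    obtain ⟨p', ext, hpp', hfac', hprod', hm'pos, hm'lt, hnf', hext', hpw'⟩ :=
      pvFacLoop_spec n 2 [] (le_refl 2) hn (by intro q h1 h2; omega)
    rw [List.nil_append] at hfac'
    have hnotdvd1 : ∀ q : Int, 2 ≤ q → ¬ q ∣ (1 : Int) := by
      intro q hq hd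
      have := Int.le_of_dvd one_pos hd
      omega
    -- the factor list used by B, with the hypotheses pvExpand_spec needs
    have hstep : ∃ fac, (if 1 < (pvFacLoop n 2 []).1
            then (pvFacLoop n 2 []).2 ++ [((pvFacLoop n 2 []).1, 1)]
            else (pvFacLoop n 2 []).2) = fac ∧
        (∀ pe ∈ fac, 2 ≤ pe.1 ∧ 1 ≤ pe.2 ∧ pe.1.natAbs.Prime ∧ ¬ pe.1 ∣ (1:Int)) ∧
        List.Pairwise (fun a b : Int × Int => a.1 < b.1) fac ∧
        n = 1 * pvProdFE fac := by
      by_cases hm1 : 1 < (pvFacLoop n 2 []).1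
      · -- leftover cofactor appended as a prime
        have hpm' : p' ≤ (pvFacLoop n 2 []).1 := by
          by_contra hc
          exact hnf' (pvFacLoop n 2 []).1 (by omega) (by omega) (dvd_refl _)
        have hm'pr : ((pvFacLoop n 2 []).1).natAbs.Prime := by
          rw [Nat.prime_def_lt]
          refine ⟨by omega, ?_⟩
          intro r hr hrd
          by_contra hr1
          have hr0 : r ≠ 0 := by
            rintro rfl
            rw [Nat.zero_dvd] at hrd
            omega
          have hr2 : 2 ≤ r := by omega
          have hrI : (r : Int) ∣ (pvFacLoop n 2 []).1 := by
            have h1 : (r : Int) ∣ (((pvFacLoop n 2 []).1).natAbs : Int) :=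
              Int.natCast_dvd_natCast.mpr hrd
            rwa [Int.natCast_natAbs, abs_of_nonneg (by omega : (0:Int) ≤ (pvFacLoop n 2 []).1)]
              at h1
          obtain ⟨s, hs⟩ := hrI
          have hspos : 0 < s := by nlinarith
          have hs1 : s ≠ 1 := by
            rintro rfl
            rw [mul_one] at hs
            omega
          have hs2 : 2 ≤ s := by omega
          by_cases hcase : (r : Int) < p'
          · exact hnf' r (by exact_mod_cast hr2) hcase ⟨s, hs⟩
          · have hsp : s < p' := by nlinarith
            exact hnf' s hs2 hsp ⟨r, by rw [hs]; ring⟩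
        refine ⟨(pvFacLoop n 2 []).2 ++ [((pvFacLoop n 2 []).1, 1)], by rw [if_pos hm1], ?_, ?_, ?_⟩
        · intro pe hpe
          rcases List.mem_append.1 hpe with h | h
          · rw [hfac'] at h
            obtain ⟨a1, _, _, a4, a5, _⟩ := hext' pe h
            exact ⟨a1, a4, a5, hnotdvd1 pe.1 a1⟩
          · rw [List.mem_singleton] at h
            rw [h]
            exact ⟨by omega, le_refl 1, hm'pr, hnotdvd1 _ (by omega)⟩
        · rw [hfac', List.pairwise_append]
          refine ⟨hpw', List.pairwise_singleton _ _, ?_⟩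
          intro a ha b hb
          rw [List.mem_singleton] at hb
          rw [hb]
          have := (hext' a ha).2.2.1
          omega
        · rw [hfac']
          have h2 : pvProdFE (ext ++ [((pvFacLoop n 2 []).1, 1)])
              = pvProdFE ext * (pvFacLoop n 2 []).1 := by
            simp [pvProdFE]
          rw [h2]
          conv_lhs => rw [hprod']
          ring
      · -- the cofactor is 1
        have hm'1 : (pvFacLoop n 2 []).1 = 1 := by omega
        refine ⟨(pvFacLoop n 2 []).2, by rw [if_neg hm1], ?_, ?_, ?_⟩
        · intro pe hpe
          rw [hfac'] at hpe
          obtain ⟨a1, _, _, a4, a5, _⟩ := hext' pe hpe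
          exact ⟨a1, a4, a5, hnotdvd1 pe.1 a1⟩
        · rw [hfac']; exact hpw'
        · rw [hfac']
          conv_lhs => rw [hprod']
          rw [hm'1]
    obtain ⟨fac, hfaceq, hfe, hpwF, hprodF⟩ := hstep
    have hE := pvExpand_spec fac [1] 1 one_pos hfe hpwF (List.nodup_singleton 1) mem_one_char
    have hEmem : ∀ x, x ∈ pvExpand fac [1] ↔ 0 < x ∧ x ∣ n := by
      intro x
      rw [(hE.2 x)]
      rw [← hprodF]
    rw [hBdef, hfaceq]
    exact pv_assemble n hn (pvExpand fac [1]) hE.1 hEmem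
  · -- n ≤ 0: both loops exit immediately
    have hA : pvALoop n 2 [] = [] := by
      rw [pvALoop, dif_neg (by omega : ¬ ((2:Int) * 2 ≤ n))]
    have hF : pvFacLoop n 2 [] = (n, []) := by
      rw [pvFacLoop, dif_neg (by omega : ¬ ((2:Int) * 2 ≤ n))]
    have hsortnil : PySem.List.sorted ([] : List Int) (fun x => x) false = [] :=
      PySem.List.sorted_eq_of_perm_of_pairwise_lt _ _ _ (List.Perm.refl []) List.Pairwise.nil
    have hsort1 : PySem.List.sorted [(1:Int)] (fun x => x) false = [1] :=
      PySem.List.sorted_eq_of_perm_of_pairwise_lt _ _ _ (List.Perm.refl [1])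
        (List.pairwise_singleton _ _)
    have h1n : ¬ (1 < n) := by omega
    have hfc : (if 1 < (pvFacLoop n 2 []).1
        then (pvFacLoop n 2 []).2 ++ [((pvFacLoop n 2 []).1, 1)]
        else (pvFacLoop n 2 []).2) = [] := by
      rw [hF]
      simp [h1n]
    rw [hA, hsortnil, hBdef, hfc,
      show pvExpand [] [1] = [1] from rfl, hsort1]
    simp
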